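-- pv_equiv track=rewrite | github.com/gsellamu/02-clinical-hypno-self-improvement-platform | backend/test_enhanced_standalone.py | _get_max_streak
-- ===== SOURCE A (Python) =====
-- from typing import Dict, List, Optional
--
-- def _get_max_streak(values: List[bool]) -> int:
--     """Get maximum consecutive same answers"""
--     if not values:
--         return 0
--
--     max_streak = 1
--     current_streak = 1
--
--     for i in range(1, len(values)):
--         if values[i] == values[i-1]:
--             current_streak += 1
--             max_streak = max(max_streak, current_streak)
--         else:
--             current_streak = 1
--
--     return max_streak
-- ===== SOURCE B (Python) =====
-- from typing import List
--
--
-- def _get_max_streak(values: List[bool]) -> int: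
--     """Get maximum consecutive same answers"""
--     if not values:
--         return 0
--
--     def solve(vs):
--         # returns (best, prefix_run, suffix_run, first, last, length) for non-empty vs
--         if len(vs) <= 1:
--             return (1, 1, 1, vs[0], vs[0], 1)
--         m = len(vs) // 2
--         bl, pl, sl, fl, ll, nl = solve(vs[:m])
--         br, pr, sr, fr, lr, nr = solve(vs[m:])
--         best = max(bl, br)
--         if ll == fr:
--             best = max(best, sl + pr)
--         pre = pl + pr if (ll == fr and pl == nl) else pl
--         suf = sr + sl if (ll == fr and sr == nr) else sr
--         return (best, pre, suf, fl, lr, nl + nr)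
--
--     return solve(values)[0]
-- ===== Notes on version B (the rewrite author's own statement) =====
-- stated objective: alternative
-- what changed: Replaced the left-to-right current/max counter scan by a divide-and-conquer that recursively splits the list in halves and merges (best, prefix-run, suffix-run, first, last, length) summaries.
import Mathlib
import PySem

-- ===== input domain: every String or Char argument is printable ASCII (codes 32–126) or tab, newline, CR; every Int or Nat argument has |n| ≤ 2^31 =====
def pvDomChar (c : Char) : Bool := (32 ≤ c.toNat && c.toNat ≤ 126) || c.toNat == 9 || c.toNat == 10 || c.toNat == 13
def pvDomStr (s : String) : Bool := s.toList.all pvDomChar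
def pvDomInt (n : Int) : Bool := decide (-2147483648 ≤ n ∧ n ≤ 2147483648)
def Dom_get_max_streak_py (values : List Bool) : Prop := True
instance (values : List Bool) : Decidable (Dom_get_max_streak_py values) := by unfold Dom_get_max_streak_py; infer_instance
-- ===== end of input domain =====

-- B replaces A's left-to-right current/max counter scan by a divide-and-conquer on halves
-- merging (best, prefix-run, suffix-run, first, last, length) summaries; same result, alternative algorithm.

-- ===== PORT A =====
-- literal port: early return on empty, then for i in range(1, len(values)) with state (max_streak, current_streak)
def get_max_streak_py (values : List Bool) : Int :=
  match values with
  | [] => 0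
  | _ :: _ =>
    ((PySem.List.pyRange 1 (values.length : Int) 1).foldl
      (fun (s : Int × Int) (i : Int) =>
        if PySem.List.pyGetD values i false == PySem.List.pyGetD values (i - 1) false then
          (max s.1 (s.2 + 1), s.2 + 1)
        else
          (s.1, 1))
      (1, 1)).1

-- ===== PORT B =====
-- port of B's inner `solve`: summary tuple (best, pre, suf, first, last, length); vs[:m]/vs[m:] with
-- m = len(vs)//2 and 0 ≤ m < len(vs) are exactly List.take m / List.drop m; `if len(vs) <= 1` is the
-- base case (solve is only called on non-empty lists, so vs[0] is vs.headD false there)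
-- fuel = list length bounds the recursion depth (mere totality guard; the algorithm is B's
-- divide-and-conquer, and the fuel is never exhausted on the calls pvSolve makes)
def pvSolveF (fuel : Nat) (vs : List Bool) : Int × Int × Int × Bool × Bool × Int :=
  match fuel with
  | 0 => (1, 1, 1, vs.headD false, vs.headD false, 1)
  | fuel + 1 =>
    if vs.length ≤ 1 then
      (1, 1, 1, vs.headD false, vs.headD false, 1)
    else
      match pvSolveF fuel (vs.take (vs.length / 2)), pvSolveF fuel (vs.drop (vs.length / 2)) with
      | (bl, pl, sl, fl, ll, nl), (br, pr, sr, fr, lr, nr) =>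
        (if ll == fr then max (max bl br) (sl + pr) else max bl br,
         if ll == fr && pl == nl then pl + pr else pl,
         if ll == fr && sr == nr then sr + sl else sr,
         fl, lr, nl + nr)

def pvSolve (vs : List Bool) : Int × Int × Int × Bool × Bool × Int := pvSolveF vs.length vs

def get_max_streak_py_alt (values : List Bool) : Int :=
  match values with
  | [] => 0
  | _ :: _ => (pvSolve values).1

-- ===== PRECONDITION & SPEC =====
def Spec_get_max_streak_py (values : List Bool) (out : Int) : Prop := out = get_max_streak_py_alt values
instance (values : List Bool) (out : Int) : Decidable (Spec_get_max_streak_py values out) := by unfold Spec_get_max_streak_py; infer_instance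

-- ===== CLAIM (what is proved, stated in full; the proofs are below) =====
def Claim_equal_get_max_streak_py : Prop := ∀ (values : List Bool), Dom_get_max_streak_py values → Spec_get_max_streak_py values (get_max_streak_py values)

-- ===== LEMMAS AND PROOFS =====

-- run-length list of a (cur,cnt)-prefixed list, and its pieces
def pvGroupGo (cur : Bool) (cnt : Int) : List Bool → List Int
  | [] => [cnt]
  | y :: ys => if y == cur then pvGroupGo cur (cnt + 1) ys else cnt :: pvGroupGo y 1 ys

def pvFront (cur : Bool) (cnt : Int) : List Bool → List Int
  | [] => []
  | y :: ys => if y == cur then pvFront cur (cnt + 1) ys else cnt :: pvFront y 1 ys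

def pvLastVal (cur : Bool) : List Bool → Bool
  | [] => cur
  | y :: ys => pvLastVal y ys

def pvLastCnt (cur : Bool) (cnt : Int) : List Bool → Int
  | [] => cnt
  | y :: ys => if y == cur then pvLastCnt cur (cnt + 1) ys else pvLastCnt y 1 ys

def pvPreCnt (x : Bool) : List Bool → Int
  | [] => 1
  | y :: ys => if y == x then 1 + pvPreCnt x ys else 1

-- max of a list of run lengths, 0 for empty
def pvML (l : List Int) : Int := l.foldl max 0

theorem pvFoldl_max_shift (t : List Int) (a b : Int) :
    t.foldl max (max a b) = max a (t.foldl max b) := by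
  induction t generalizing b with
  | nil => rfl
  | cons x xs ih => simp only [List.foldl_cons, max_assoc, ih]

theorem pvML_cons (a : Int) (t : List Int) : pvML (a :: t) = max a (pvML t) := by
  simp only [pvML, List.foldl_cons]
  rw [max_comm (0 : Int) a, pvFoldl_max_shift]

theorem pvML_nonneg (l : List Int) : 0 ≤ pvML l := by
  induction l with
  | nil => simp [pvML]
  | cons a t ih => rw [pvML_cons]; omega

theorem pvML_append (a b : List Int) : pvML (a ++ b) = max (pvML a) (pvML b) := by
  induction a with
  | nil =>
    have := pvML_nonneg b
    rw [List.nil_append, show pvML [] = 0 from rfl]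
    omega
  | cons x xs ih =>
    rw [List.cons_append, pvML_cons, pvML_cons, ih, max_assoc]

theorem pvGroupGo_mem (ys : List Bool) (cur : Bool) (cnt : Int) (h : 1 ≤ cnt) :
    ∀ z ∈ pvGroupGo cur cnt ys, 1 ≤ z := by
  induction ys generalizing cur cnt with
  | nil => intro z hz; simp [pvGroupGo] at hz; omega
  | cons y ys ih =>
    intro z hz
    simp only [pvGroupGo] at hz
    split at hz
    · exact ih cur (cnt + 1) (by omega) z hz
    · rcases List.mem_cons.1 hz with h1 | h1
      · omega
      · exact ih y 1 (by omega) z h1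

theorem pvGroupGo_ne_nil (ys : List Bool) (cur : Bool) (cnt : Int) :
    pvGroupGo cur cnt ys ≠ [] := by
  induction ys generalizing cur cnt with
  | nil => simp [pvGroupGo]
  | cons y ys ih =>
    simp only [pvGroupGo]
    split
    · exact ih cur (cnt + 1)
    · simp

theorem pvGroupGo_eq (ys : List Bool) (cur : Bool) (cnt : Int) :
    pvGroupGo cur cnt ys = pvFront cur cnt ys ++ [pvLastCnt cur cnt ys] := by
  induction ys generalizing cur cnt with
  | nil => rfl
  | cons y ys ih =>
    simp only [pvGroupGo, pvFront, pvLastCnt]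
    split
    · exact ih cur (cnt + 1)
    · simp [ih y 1]

theorem pvGroupGo_append (ys zs : List Bool) (cur : Bool) (cnt : Int) :
    pvGroupGo cur cnt (ys ++ zs)
      = pvFront cur cnt ys ++ pvGroupGo (pvLastVal cur ys) (pvLastCnt cur cnt ys) zs := by
  induction ys generalizing cur cnt with
  | nil => rfl
  | cons y ys ih =>
    simp only [List.cons_append, pvGroupGo, pvFront, pvLastVal, pvLastCnt]
    split
    · next hy => rw [ih cur (cnt + 1), eq_of_beq hy]
    · simp [ih y 1]

theorem pvBump (zs : List Bool) (cur : Bool) (cnt d : Int) :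
    pvGroupGo cur (cnt + d) zs
      = ((pvGroupGo cur cnt zs).headI + d) :: (pvGroupGo cur cnt zs).tail := by
  induction zs generalizing cnt with
  | nil => rfl
  | cons y ys ih =>
    simp only [pvGroupGo]
    split
    · rw [show cnt + d + 1 = (cnt + 1) + d by ring, ih (cnt + 1)]
    · rfl

theorem pvPreCnt_headI (xs : List Bool) (x : Bool) :
    pvPreCnt x xs = (pvGroupGo x 1 xs).headI := by
  induction xs generalizing x with
  | nil => rfl
  | cons y ys ih =>
    simp only [pvPreCnt, pvGroupGo]
    split
    · rw [show (1 : Int) + 1 = 1 + 1 from rfl, pvBump, ih x]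
      change 1 + (pvGroupGo x 1 ys).headI = (pvGroupGo x 1 ys).headI + 1
      ring
    · rfl

theorem pvLastCnt_ge (ys : List Bool) (cur : Bool) (cnt : Int) (h : 1 ≤ cnt) :
    1 ≤ pvLastCnt cur cnt ys := by
  induction ys generalizing cur cnt with
  | nil => exact h
  | cons y ys ih =>
    simp only [pvLastCnt]
    split
    · exact ih cur (cnt + 1) (by omega)
    · exact ih y 1 (by omega)

theorem pvLastCnt_all (ys : List Bool) (x : Bool) (cnt : Int) (h : ys.all (· == x) = true) :
    pvLastCnt x cnt ys = cnt + (ys.length : Int) := by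
  induction ys generalizing cnt with
  | nil => simp [pvLastCnt]
  | cons y ys ih =>
    simp only [List.all_cons, Bool.and_eq_true] at h
    simp only [pvLastCnt, if_pos h.1, List.length_cons]
    rw [ih (cnt + 1) h.2]
    push_cast; ring

theorem pvLastCnt_le (ys : List Bool) (cur : Bool) (cnt : Int) (hc : 0 ≤ cnt) :
    pvLastCnt cur cnt ys ≤ cnt + (ys.length : Int) := by
  induction ys generalizing cur cnt with
  | nil => simp [pvLastCnt]
  | cons y ys ih =>
    simp only [pvLastCnt, List.length_cons]
    split
    · have := ih cur (cnt + 1) (by omega); push_cast; push_cast at this; omega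
    · have := ih y 1 (by omega)
      push_cast; omega

theorem pvLastCnt_not_all (ys : List Bool) (x : Bool) (cnt : Int)
    (h : ¬ ys.all (· == x) = true) :
    pvLastCnt x cnt ys ≤ (ys.length : Int) := by
  induction ys generalizing x cnt with
  | nil => simp at h
  | cons y ys ih =>
    simp only [pvLastCnt, List.length_cons]
    by_cases hy : (y == x) = true
    · rw [if_pos hy]
      have hna : ¬ ys.all (· == x) = true := by
        intro ha; exact h (by simp [hy, ha])
      have := ih x (cnt + 1) hna
      push_cast; omega
    · rw [if_neg hy]
      have := pvLastCnt_le ys y 1 (by omega)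
      push_cast; omega

theorem pvBumpL (ys : List Bool) (cur : Bool) (cnt d : Int) :
    pvLastCnt cur (cnt + d) ys
      = pvLastCnt cur cnt ys + (if ys.all (· == cur) then d else 0) := by
  induction ys generalizing cur cnt with
  | nil => simp [pvLastCnt]
  | cons y ys ih =>
    simp only [pvLastCnt, List.all_cons]
    by_cases hy : (y == cur) = true
    · rw [if_pos hy, if_pos hy, show cnt + d + 1 = (cnt + 1) + d by ring, ih cur (cnt + 1)]
      simp [hy]
    · rw [if_neg hy, if_neg hy]
      simp [hy]

theorem pvLastCnt_eq_iff (ys : List Bool) (x : Bool) :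
    pvLastCnt x 1 ys = 1 + (ys.length : Int) ↔ ys.all (· == x) = true := by
  constructor
  · intro h
    by_contra ha
    have := pvLastCnt_not_all ys x 1 ha
    omega
  · intro ha
    rw [pvLastCnt_all ys x 1 ha]

theorem pvPreCnt_all_len (ys : List Bool) (x : Bool) (h : ys.all (· == x) = true) :
    pvPreCnt x ys = 1 + (ys.length : Int) := by
  induction ys with
  | nil => simp [pvPreCnt]
  | cons y ys ih =>
    simp only [List.all_cons, Bool.and_eq_true] at h
    simp only [pvPreCnt, if_pos h.1, ih h.2, List.length_cons]
    push_cast; ring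

theorem pvPreCnt_not_all_le (ys : List Bool) (x : Bool) (h : ¬ ys.all (· == x) = true) :
    pvPreCnt x ys ≤ (ys.length : Int) := by
  induction ys with
  | nil => simp at h
  | cons y ys ih =>
    simp only [pvPreCnt, List.length_cons]
    by_cases hy : (y == x) = true
    · have hna : ¬ ys.all (· == x) = true := by
        intro ha; exact h (by simp [hy, ha])
      have := ih hna
      push_cast; omega
    · rw [if_neg hy]
      have h0 : (0 : Int) ≤ (ys.length : Int) := by positivity
      push_cast; omega

theorem pvPreCnt_eq_iff (ys : List Bool) (x : Bool) :
    pvPreCnt x ys = 1 + (ys.length : Int) ↔ ys.all (· == x) = true := by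
  constructor
  · intro h
    by_contra ha
    have := pvPreCnt_not_all_le ys x ha
    omega
  · exact pvPreCnt_all_len ys x

theorem pvPreCnt_all (ys zs : List Bool) (x : Bool) (h : ys.all (· == x) = true) :
    pvPreCnt x (ys ++ zs) = (ys.length : Int) + pvPreCnt x zs := by
  induction ys with
  | nil => simp
  | cons y ys ih =>
    simp only [List.all_cons, Bool.and_eq_true] at h
    simp only [List.cons_append, pvPreCnt, if_pos h.1, ih h.2, List.length_cons]
    push_cast; ring

theorem pvPreCnt_not_all (ys zs : List Bool) (x : Bool) (h : ¬ ys.all (· == x) = true) :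
    pvPreCnt x (ys ++ zs) = pvPreCnt x ys := by
  induction ys with
  | nil => simp at h
  | cons y ys ih =>
    simp only [List.cons_append, pvPreCnt]
    by_cases hy : (y == x) = true
    · have : ¬ ys.all (· == x) = true := by
        intro ha; exact h (by simp [hy, ha])
      rw [if_pos hy, if_pos hy, ih this]
    · rw [if_neg hy, if_neg hy]

theorem pvLastVal_all (ys : List Bool) (x : Bool) (h : ys.all (· == x) = true) :
    pvLastVal x ys = x := by
  induction ys generalizing x with
  | nil => rfl
  | cons y ys ih =>
    simp only [List.all_cons, Bool.and_eq_true] at h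
    simp only [pvLastVal]
    rw [eq_of_beq h.1]
    exact ih x h.2

theorem pvLastVal_append (ys zs : List Bool) (cur : Bool) :
    pvLastVal cur (ys ++ zs) = pvLastVal (pvLastVal cur ys) zs := by
  induction ys generalizing cur with
  | nil => rfl
  | cons y ys ih => simp only [List.cons_append, pvLastVal, ih y]

theorem pvLastCnt_append (ys zs : List Bool) (cur : Bool) (cnt : Int) :
    pvLastCnt cur cnt (ys ++ zs)
      = pvLastCnt (pvLastVal cur ys) (pvLastCnt cur cnt ys) zs := by
  induction ys generalizing cur cnt with
  | nil => rfl
  | cons y ys ih =>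
    simp only [List.cons_append, pvLastCnt, pvLastVal]
    split
    · next hy => rw [ih cur (cnt + 1), eq_of_beq hy]
    · exact ih y 1

-- merge lemma for the best streak
theorem pvMerge_best (xs ys : List Bool) (x y : Bool) :
    pvML (pvGroupGo x 1 (xs ++ y :: ys))
      = if pvLastVal x xs == y then
          max (max (pvML (pvGroupGo x 1 xs)) (pvML (pvGroupGo y 1 ys)))
              (pvLastCnt x 1 xs + pvPreCnt y ys)
        else
          max (pvML (pvGroupGo x 1 xs)) (pvML (pvGroupGo y 1 ys)) := by
  rw [pvGroupGo_append]
  have hF : pvML (pvGroupGo x 1 xs) = max (pvML (pvFront x 1 xs)) (pvLastCnt x 1 xs) := by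
    rw [pvGroupGo_eq, pvML_append]
    have hc := pvLastCnt_ge xs x 1 (by omega)
    have h1 : pvML [pvLastCnt x 1 xs] = max (0 : Int) (pvLastCnt x 1 xs) := rfl
    rw [h1]
    omega
  have hMF := pvML_nonneg (pvFront x 1 xs)
  have hc := pvLastCnt_ge xs x 1 (by omega)
  simp only [pvGroupGo]
  by_cases hyv : (y == pvLastVal x xs) = true
  · have hy' : y = pvLastVal x xs := eq_of_beq hyv
    rw [hy']
    obtain ⟨p, rest, hG⟩ := List.exists_cons_of_ne_nil (pvGroupGo_ne_nil ys (pvLastVal x xs) 1)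
    have hp1 : 1 ≤ p := pvGroupGo_mem ys (pvLastVal x xs) 1 (by omega) p
      (by rw [hG]; exact List.mem_cons_self)
    have hMLt := pvML_nonneg rest
    have hB : pvGroupGo (pvLastVal x xs) (pvLastCnt x 1 xs + 1) ys
        = (p + pvLastCnt x 1 xs) :: rest := by
      rw [show pvLastCnt x 1 xs + 1 = 1 + pvLastCnt x 1 xs by ring, pvBump, hG]
      rfl
    have hp : pvPreCnt (pvLastVal x xs) ys = p := by rw [pvPreCnt_headI, hG]; rfl
    rw [if_pos (by simp), if_pos (by simp), hB, pvML_append, pvML_cons, hF, hG, pvML_cons, hp]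
    simp only [max_def]
    split_ifs <;> omega
  · have hvy : ¬ (pvLastVal x xs == y) = true := by
      intro hc2; exact hyv (by rw [eq_of_beq hc2]; simp)
    obtain ⟨p, rest, hG⟩ := List.exists_cons_of_ne_nil (pvGroupGo_ne_nil ys y 1)
    have hp1 : 1 ≤ p := pvGroupGo_mem ys y 1 (by omega) p (by rw [hG]; exact List.mem_cons_self)
    have hMLt := pvML_nonneg rest
    rw [if_neg hyv, if_neg hvy, pvML_append, pvML_cons, hF, hG, pvML_cons]
    simp only [max_def]
    split_ifs <;> omega

-- merge lemma for the prefix run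
theorem pvMerge_pre (xs ys : List Bool) (x y : Bool) :
    pvPreCnt x (xs ++ y :: ys)
      = if (pvLastVal x xs == y) && (pvPreCnt x xs == 1 + (xs.length : Int)) then
          pvPreCnt x xs + pvPreCnt y ys
        else pvPreCnt x xs := by
  by_cases ha : xs.all (· == x) = true
  · have hv : pvLastVal x xs = x := pvLastVal_all xs x ha
    have hp : pvPreCnt x xs = 1 + (xs.length : Int) := (pvPreCnt_eq_iff xs x).2 ha
    rw [pvPreCnt_all xs (y :: ys) x ha, hv, hp]
    simp only [pvPreCnt]
    by_cases hy : (y == x) = true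
    · have hy' : y = x := eq_of_beq hy
      subst hy'
      rw [if_pos hy, if_pos (by simp)]
      ring
    · have hxy : ¬ (x == y) = true := by
        intro hc; exact hy (by rw [eq_of_beq hc]; simp)
      rw [if_neg hy, if_neg (by simp [hxy])]
      ring
  · have hp : pvPreCnt x xs ≠ 1 + (xs.length : Int) := fun hc => ha ((pvPreCnt_eq_iff xs x).1 hc)
    rw [pvPreCnt_not_all xs (y :: ys) x ha, if_neg (by simp [hp])]

-- merge lemma for the suffix run
theorem pvMerge_suf (xs ys : List Bool) (x y : Bool) :
    pvLastCnt x 1 (xs ++ y :: ys)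
      = if (pvLastVal x xs == y) && (pvLastCnt y 1 ys == 1 + (ys.length : Int)) then
          pvLastCnt y 1 ys + pvLastCnt x 1 xs
        else pvLastCnt y 1 ys := by
  rw [pvLastCnt_append]
  simp only [pvLastCnt]
  by_cases hyv : (y == pvLastVal x xs) = true
  · have hy' : y = pvLastVal x xs := eq_of_beq hyv
    rw [if_pos hyv, show pvLastCnt x 1 xs + 1 = 1 + pvLastCnt x 1 xs by ring, pvBumpL, ← hy']
    by_cases ha : ys.all (· == y) = true
    · have heq := (pvLastCnt_eq_iff ys y).2 ha
      rw [if_pos ha, if_pos (by simp [heq])]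
    · have hne : pvLastCnt y 1 ys ≠ 1 + (ys.length : Int) :=
        fun hc => ha ((pvLastCnt_eq_iff ys y).1 hc)
      rw [if_neg ha, if_neg (by simp [hne])]
      ring
  · have hvy : ¬ (pvLastVal x xs == y) = true := by
      intro hc; exact hyv (by rw [eq_of_beq hc]; simp)
    rw [if_neg hyv, if_neg (by simp [hvy])]

-- the divide-and-conquer summary computed by B equals the (best, pre, suf, first, last, length) spec
theorem pvSolveF_spec (n : Nat) : ∀ (x : Bool) (xs : List Bool), xs.length < n →
    pvSolveF n (x :: xs)
      = (pvML (pvGroupGo x 1 xs), pvPreCnt x xs, pvLastCnt x 1 xs, x, pvLastVal x xs,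
         (1 : Int) + (xs.length : Int)) := by
  induction n with
  | zero => intro x xs h; omega
  | succ n ih =>
    intro x xs hlen
    match hxs : xs with
    | [] =>
      simp [pvSolveF, pvGroupGo, pvML, pvPreCnt, pvLastCnt, pvLastVal]
    | z :: zs =>
      rw [pvSolveF]
      have hlen2 : ¬ (x :: z :: zs).length ≤ 1 := by simp
      rw [if_neg hlen2]
      set m := (x :: z :: zs).length / 2 with hmdef
      have hm1 : 1 ≤ m := by simp [hmdef]; omega
      have hm2 : m < zs.length + 2 := by simp [hmdef]; omega
      have hk : m - 1 + 1 = m := by omega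
      have htake : (x :: z :: zs).take m = x :: (z :: zs).take (m - 1) := by
        rw [← hk, List.take_succ_cons, Nat.add_sub_cancel]
      have hdropne : (x :: z :: zs).drop m ≠ [] := by
        simp only [ne_eq, List.drop_eq_nil_iff]
        simp; omega
      obtain ⟨y, ys, hdrop⟩ := List.exists_cons_of_ne_nil hdropne
      have hwhole := List.take_append_drop m (x :: z :: zs)
      rw [htake, hdrop] at hwhole
      rw [List.cons_append] at hwhole
      injection hwhole with _ hsplit
      have hzlen : zs.length < n := by
        simp only [List.length_cons] at hlen; omega
      have hlt1 : ((z :: zs).take (m - 1)).length < n := by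
        have h1 : ((z :: zs).take (m - 1)).length ≤ m - 1 := by
          simpa using List.length_take_le (m - 1) (z :: zs)
        omega
      have hlens : ((z :: zs).take (m - 1)).length + (1 + ys.length) = 1 + zs.length := by
        have h1 : ((z :: zs).take (m - 1)).length + (y :: ys).length = (z :: zs).length := by
          rw [← List.length_append, hsplit]
        simp only [List.length_cons] at h1
        omega
      have hlt2 : ys.length < n := by omega
      rw [htake, hdrop, ih x _ hlt1, ih y ys hlt2]
      dsimp only
      conv_rhs => rw [← hsplit]
      rw [pvMerge_best, pvMerge_pre, pvMerge_suf, pvLastVal_append]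
      simp only [Prod.mk.injEq, pvLastVal, List.length_append, List.length_cons]
      simp only [true_and]
      push_cast
      omega

-- ===== A-side machinery: A's indexed fold equals the run-length maximum =====

-- reference recursion for A's loop: prev value, current streak, best streak
def pvGo (prev : Bool) (cur best : Int) : List Bool → Int
  | [] => best
  | x :: xs => if x == prev then pvGo x (cur + 1) (max best (cur + 1)) xs else pvGo x 1 best xs

theorem pvGroupGo_le (ys : List Bool) (cur : Bool) (cnt : Int) (h : 1 ≤ cnt) :
    cnt ≤ pvML (pvGroupGo cur cnt ys) := by
  induction ys generalizing cur cnt with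
  | nil =>
    simp only [pvGroupGo, pvML, List.foldl]
    omega
  | cons y ys ih =>
    simp only [pvGroupGo]
    split
    · have := ih cur (cnt + 1) (by omega)
      omega
    · rw [pvML_cons cnt]
      omega

-- A's loop equals the running max over the run lengths
theorem pvGo_eq_ml (ys : List Bool) (cur : Bool) (cnt best : Int)
    (h1 : 1 ≤ cnt) (h2 : cnt ≤ best) :
    pvGo cur cnt best ys = max best (pvML (pvGroupGo cur cnt ys)) := by
  induction ys generalizing cur cnt best with
  | nil =>
    simp only [pvGo, pvGroupGo, pvML, List.foldl]
    omega
  | cons y ys ih =>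
    simp only [pvGo, pvGroupGo]
    split
    · next hyc =>
      rw [eq_of_beq hyc]
      rw [ih cur (cnt + 1) (max best (cnt + 1)) (by omega) (by omega)]
      have := pvGroupGo_le ys cur (cnt + 1) (by omega)
      omega
    · rw [ih y 1 best (by omega) (by omega), pvML_cons cnt]
      omega

-- A's indexed fold equals the reference recursion pvGo
theorem pvFoldA (values : List Bool) (n a : Nat) (hn : values.length ≤ a + n)
    (ha : 1 ≤ a) (best cur : Int) :
    ((PySem.List.pyRange (a : Int) (values.length : Int) 1).foldl
      (fun (s : Int × Int) (i : Int) =>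
        if PySem.List.pyGetD values i false == PySem.List.pyGetD values (i - 1) false then
          (max s.1 (s.2 + 1), s.2 + 1)
        else
          (s.1, 1))
      (best, cur)).1
    = pvGo (values.getD (a - 1) false) cur best (values.drop a) := by
  induction n generalizing a best cur with
  | zero =>
    rw [PySem.List.pyRange_one_eq_nil (by exact_mod_cast hn)]
    rw [List.drop_eq_nil_of_le (by omega)]
    rfl
  | succ n ih =>
    by_cases hlt : a < values.length
    · rw [PySem.List.pyRange_one_cons (by exact_mod_cast hlt)]
      rw [List.foldl_cons]
      have hga : PySem.List.pyGetD values (a : Int) false = values.getD a false :=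
        PySem.List.pyGetD_natCast values a false
      have hga1 : PySem.List.pyGetD values ((a : Int) - 1) false = values.getD (a - 1) false := by
        have : ((a : Int) - 1) = ((a - 1 : Nat) : Int) := by omega
        rw [this, PySem.List.pyGetD_natCast]
      have hdrop : values.drop a = values[a] :: values.drop (a + 1) :=
        List.drop_eq_getElem_cons hlt
      have hgetD : values.getD a false = values[a] := List.getD_eq_getElem values false hlt
      have hgetD' : values[a]?.getD false = values[a] := by
        simp [List.getElem?_eq_getElem hlt]
      rw [hdrop]
      simp only [pvGo, hga, hga1, hgetD]
      split
      · rw [show ((a : Int) + 1) = ((a + 1 : Nat) : Int) by omega,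
          ih (a + 1) (by omega) (by omega)]
        simp [hgetD']
      · rw [show ((a : Int) + 1) = ((a + 1 : Nat) : Int) by omega,
          ih (a + 1) (by omega) (by omega)]
        simp [hgetD']
    · rw [PySem.List.pyRange_one_eq_nil (by exact_mod_cast (by omega : values.length ≤ a))]
      rw [List.drop_eq_nil_of_le (by omega)]
      rfl

-- ===== VERDICT (by name: the statement is the Claim_ definition above) =====
theorem get_max_streak_py_spec : Claim_equal_get_max_streak_py := by
  intro values _
  unfold Spec_get_max_streak_py
  cases values with
  | nil => rfl
  | cons x xs =>
    -- A side
    have h := pvFoldA (x :: xs) (x :: xs).length 1 (by omega) (by omega) 1 1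
    push_cast at h
    norm_num at h
    simp only [get_max_streak_py, List.length_cons]
    push_cast
    norm_num
    rw [h]
    rw [pvGo_eq_ml xs x 1 1 (by omega) (by omega)]
    -- B side
    simp only [get_max_streak_py_alt]
    rw [show pvSolve (x :: xs) = pvSolveF (xs.length + 1) (x :: xs) from rfl,
      pvSolveF_spec (xs.length + 1) x xs (by omega)]
    have := pvGroupGo_le xs x 1 (by omega)
    dsimp only
    omega
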